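-- pv_equiv track=rewrite | github.com/MikesHorcrux/PromptForge | src/promptforge/forge/service.py | _should_prepare_edit
-- ===== SOURCE A (Python) =====
-- def _should_prepare_edit(request: str) -> bool:
--     lowered = request.lower()
--     edit_markers = (
--         "edit the prompt",
--         "update the prompt",
--         "rewrite the prompt",
--         "change the prompt",
--         "modify the prompt",
--         "fix the prompt",
--         "improve the prompt",
--         "change the system prompt",
--         "update the system prompt",
--         "rewrite the system prompt",
--         "change the user template",
--         "update the user template",
--         "rewrite the user template",
--         "make these changes",
--         "apply these changes",
--     )
--     return any(marker in lowered for marker in edit_markers)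
-- ===== SOURCE B (Python) =====
-- _EDIT_MARKERS = (
--     "edit the prompt",
--     "update the prompt",
--     "rewrite the prompt",
--     "change the prompt",
--     "modify the prompt",
--     "fix the prompt",
--     "improve the prompt",
--     "change the system prompt",
--     "update the system prompt",
--     "rewrite the system prompt",
--     "change the user template",
--     "update the user template",
--     "rewrite the user template",
--     "make these changes",
--     "apply these changes",
-- )
--
--
-- def _should_prepare_edit(request: str) -> bool:
--     lowered = request.lower()
--     for i in range(len(lowered)):
--         for marker in _EDIT_MARKERS:
--             if lowered.startswith(marker, i):
--                 return True
--     return False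
-- ===== Notes on version B (the rewrite author's own statement) =====
-- stated objective: alternative
-- what changed: Replaces A's fifteen independent substring scans ('marker in lowered' for each marker) with a single left-to-right pass over the string that, at each position, checks whether any marker begins there (prefix test), returning at the first hit.
import Mathlib
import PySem

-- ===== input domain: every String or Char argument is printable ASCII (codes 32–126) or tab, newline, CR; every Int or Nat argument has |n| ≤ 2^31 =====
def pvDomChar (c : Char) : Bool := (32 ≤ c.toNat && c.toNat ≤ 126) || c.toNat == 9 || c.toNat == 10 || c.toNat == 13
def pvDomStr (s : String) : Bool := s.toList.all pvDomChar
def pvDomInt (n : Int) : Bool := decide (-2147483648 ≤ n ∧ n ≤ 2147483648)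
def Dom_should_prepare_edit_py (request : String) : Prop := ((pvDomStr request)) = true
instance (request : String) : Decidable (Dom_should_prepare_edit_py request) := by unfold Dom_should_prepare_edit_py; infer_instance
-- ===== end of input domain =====

-- B replaces A's fifteen separate substring scans with one left-to-right pass
-- checking, at each position, whether any marker starts there (alternative, same cost).

-- ===== PORT A =====
-- the tuple literal inside _should_prepare_edit
def spe_editMarkersA : List String :=
  ["edit the prompt", "update the prompt", "rewrite the prompt", "change the prompt",
   "modify the prompt", "fix the prompt", "improve the prompt", "change the system prompt",
   "update the system prompt", "rewrite the system prompt", "change the user template",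
   "update the user template", "rewrite the user template", "make these changes",
   "apply these changes"]

def should_prepare_edit_py (request : String) : Bool :=
  let lowered := PySem.Str.lower request
  spe_editMarkersA.any (fun marker => PySem.Str.isIn marker lowered)

-- ===== PORT B =====
-- module-level _EDIT_MARKERS of Source B
def spe_editMarkersB : List String :=
  ["edit the prompt", "update the prompt", "rewrite the prompt", "change the prompt",
   "modify the prompt", "fix the prompt", "improve the prompt", "change the system prompt",
   "update the system prompt", "rewrite the system prompt", "change the user template",
   "update the user template", "rewrite the user template", "make these changes",
   "apply these changes"]

-- Source B's outer loop 'for i in range(len(lowered))': one scan over the positions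
-- (suffixes) of lowered; 'lowered.startswith(marker, i)' is the prefix test at i.
def spe_scan : List Char → Bool
  | [] => false
  | c :: rest =>
    if spe_editMarkersB.any (fun marker => marker.toList.isPrefixOf (c :: rest)) then true
    else spe_scan rest

def should_prepare_edit_py_alt (request : String) : Bool :=
  spe_scan (PySem.Str.lower request).toList

-- ===== PRECONDITION & SPEC =====
def Spec_should_prepare_edit_py (request : String) (out : Bool) : Prop := out = should_prepare_edit_py_alt request
instance (request : String) (out : Bool) : Decidable (Spec_should_prepare_edit_py request out) := by unfold Spec_should_prepare_edit_py; infer_instance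

-- ===== CLAIM (what is proved, stated in full; the proofs are below) =====
def Claim_equal_should_prepare_edit_py : Prop := ∀ (request : String), Dom_should_prepare_edit_py request → Spec_should_prepare_edit_py request (should_prepare_edit_py request)

-- ===== LEMMAS AND PROOFS =====

-- the single scan finds a hit iff some marker occurs as an infix
theorem spe_scan_eq_any_isIn (cs : List Char) :
    spe_scan cs = spe_editMarkersB.any (fun marker => PySem.Chars.isIn marker.toList cs) := by
  induction cs with
  | nil => decide
  | cons c rest ih =>
    rw [spe_scan, ih, Bool.eq_iff_iff]
    simp only [Bool.if_true_left, Bool.or_eq_true, List.any_eq_true,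
      List.isPrefixOf_iff_prefix, PySem.Chars.isIn_iff_infix, List.infix_cons_iff, decide_eq_true_eq]
    exact ⟨fun h => h.elim (fun ⟨x, hx, hp⟩ => ⟨x, hx, Or.inl hp⟩)
      (fun ⟨x, hx, hq⟩ => ⟨x, hx, Or.inr hq⟩),
      fun ⟨x, hx, h⟩ => h.elim (fun hp => Or.inl ⟨x, hx, hp⟩) (fun hq => Or.inr ⟨x, hx, hq⟩)⟩

theorem should_prepare_edit_py_spec : Claim_equal_should_prepare_edit_py := by
  intro request _
  unfold Spec_should_prepare_edit_py should_prepare_edit_py should_prepare_edit_py_alt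
  rw [spe_scan_eq_any_isIn]
  simp [spe_editMarkersA, spe_editMarkersB]
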